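-- pv_equiv track=rewrite | github.com/ShrutikaPokale/Series | python_series.py | is_part_of_series
-- ===== SOURCE A (Python) =====
-- def f(n):
--     if n==0:
--         y=0
--     elif n==1:
--         y=1
--     else:
--         y=3*f(n-1) - 2*f(n-2)
--     return y
--
-- def is_part_of_series(lst):
--     output=[]
--     for i in lst:
--         j=2
--         while(j>=2):
--             check=f(j)
--             if check==int(i):
--                 output.append(i)
--                 break
--             elif check>int(i):
--                 break
--             j+=1
--     return output
-- ===== SOURCE B (Python) =====
-- def is_part_of_series(lst):
--     # keep i iff i = 2^k - 1 for some k >= 2, i.e. i >= 3 and i+1 is a power of two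
--     return [i for i in lst if i >= 3 and (i + 1) & i == 0]
-- ===== Notes on version B (the rewrite author's own statement) =====
-- stated objective: faster
-- what changed: A tests each element by recomputing the series with the exponential double recursion f(n)=3f(n-1)-2f(n-2) inside an unbounded search loop; B uses the closed form f(n)=2^n-1 and keeps i iff i>=3 and (i+1)&i==0 (i+1 a power of two), a constant-time test per element.
import Mathlib
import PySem

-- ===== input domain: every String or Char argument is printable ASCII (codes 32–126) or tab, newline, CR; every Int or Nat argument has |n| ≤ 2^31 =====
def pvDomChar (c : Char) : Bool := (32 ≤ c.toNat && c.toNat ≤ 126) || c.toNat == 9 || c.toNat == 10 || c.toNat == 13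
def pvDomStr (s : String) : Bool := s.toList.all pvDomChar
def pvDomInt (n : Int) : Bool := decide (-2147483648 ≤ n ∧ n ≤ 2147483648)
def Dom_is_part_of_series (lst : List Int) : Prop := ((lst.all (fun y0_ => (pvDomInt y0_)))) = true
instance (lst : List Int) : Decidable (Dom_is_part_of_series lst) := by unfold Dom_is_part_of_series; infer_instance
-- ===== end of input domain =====

-- B replaces A's per-element exponential recursion f(j)=3f(j-1)-2f(j-2) and unbounded search loop
-- by the closed-form membership test "i ≥ 3 and i+1 is a power of two" (f(n) = 2^n - 1); objective: faster.

-- ===== PORT A =====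
-- Python's f, called on the nonnegative loop counter j
def fA : Nat → Int
  | 0 => 0
  | 1 => 1
  | n + 2 => 3 * fA (n + 1) - 2 * fA n

-- the while(j>=2) loop; `fuel` only makes the search total (it is proved sufficient below);
-- returns true iff the loop appended i
def loopA (i : Int) : Nat → Nat → Bool
  | 0, _ => false
  | fuel + 1, j =>
    let check := fA j
    if check = i then true
    else if check > i then false
    else loopA i fuel (j + 1)

def is_part_of_series (lst : List Int) : List Int :=
  lst.foldl (fun output i => if loopA i (i.toNat + 1) 2 then output ++ [i] else output) []

-- ===== PORT B =====
def is_part_of_series_alt (lst : List Int) : List Int :=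
  lst.filter (fun i => decide (3 ≤ i) && (Int.land (i + 1) i == 0))

-- ===== PRECONDITION & SPEC =====
def Spec_is_part_of_series (lst : List Int) (out : List Int) : Prop := out = is_part_of_series_alt lst
instance (lst : List Int) (out : List Int) : Decidable (Spec_is_part_of_series lst out) := by unfold Spec_is_part_of_series; infer_instance

-- ===== CLAIM (what is proved, stated in full; the proofs are below) =====
def Claim_equal_is_part_of_series : Prop := ∀ (lst : List Int), Dom_is_part_of_series lst → Spec_is_part_of_series lst (is_part_of_series lst)

-- ===== LEMMAS AND PROOFS =====

theorem fA_closed (n : Nat) : fA n = 2 ^ n - 1 := by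
  induction n using Nat.strong_induction_on with
  | _ n ih =>
    match n with
    | 0 => simp [fA]
    | 1 => simp [fA]
    | n + 2 =>
      rw [fA, ih (n + 1) (by omega), ih n (by omega)]
      push_cast [pow_succ]
      ring

theorem loopA_true_iff (i : Int) (fuel j : Nat)
    (hfuel : (i:Int) < 2 ^ (j + fuel) - 1) :
    loopA i fuel j = true ↔ ∃ k, j ≤ k ∧ i = 2 ^ k - 1 := by
  induction fuel generalizing j with
  | zero =>
    simp only [loopA]
    constructor
    · intro h; simp at h
    · rintro ⟨k, hk, rfl⟩
      exfalso
      have : (2:Int) ^ j ≤ 2 ^ k := pow_le_pow_right₀ (by norm_num) hk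
      simp only [Nat.add_zero] at hfuel
      omega
  | succ fuel ih =>
    rw [loopA]
    simp only [fA_closed]
    split_ifs with h1 h2
    · exact ⟨fun _ => ⟨j, le_refl j, h1.symm⟩, fun _ => rfl⟩
    · constructor
      · intro h; simp at h
      · rintro ⟨k, hk, rfl⟩
        exfalso
        have : (2:Int) ^ j ≤ 2 ^ k := pow_le_pow_right₀ (by norm_num) hk
        omega
    · rw [ih (j + 1) (by rw [show j + 1 + fuel = j + (fuel + 1) from by omega]; exact hfuel)]
      constructor
      · rintro ⟨k, hk, rfl⟩; exact ⟨k, by omega, rfl⟩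
      · rintro ⟨k, hk, rfl⟩
        refine ⟨k, ?_, rfl⟩
        rcases Nat.lt_or_ge j k with h | h
        · omega
        · have : k = j := le_antisymm h hk
          subst this; omega

theorem fuel_sufficient (i : Int) : i < 2 ^ (2 + (i.toNat + 1)) - 1 := by
  rcases Int.lt_or_le i 0 with h | h
  · have : (0:Int) < 2 ^ (2 + (i.toNat + 1)) := by positivity
    omega
  · have h1 : (i.toNat : Int) = i := Int.toNat_of_nonneg h
    have h2 : (i.toNat : Int) < 2 ^ i.toNat := by exact_mod_cast Nat.lt_two_pow_self
    have h3 : (2:Int) ^ (i.toNat + 1) ≤ 2 ^ (2 + (i.toNat + 1)) :=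
      pow_le_pow_right₀ (by norm_num) (by omega)
    have h4 : (2:Int) ^ (i.toNat + 1) = 2 * 2 ^ i.toNat := by rw [pow_succ]; ring
    omega

-- Nat bit lemmas for B's power-of-two test
theorem land_odd_even (a b : Nat) : (2 * a + 1) &&& (2 * b) = 2 * (a &&& b) := by
  have h := Nat.bitwise_bit (f := and) (by simp) true a false b
  simpa [Nat.bit, HAnd.hAnd, AndOp.and, Nat.land, Nat.mul_comm] using h

theorem land_even_odd (a b : Nat) : (2 * a) &&& (2 * b + 1) = 2 * (a &&& b) := by
  have h := Nat.bitwise_bit (f := and) (by simp) false a true b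
  simpa [Nat.bit, HAnd.hAnd, AndOp.and, Nat.land, Nat.mul_comm] using h

theorem pow_two_of_land_succ (n : Nat) (h : (n + 1) &&& n = 0) : ∃ k, n + 1 = 2 ^ k := by
  induction n using Nat.strong_induction_on with
  | _ n ih =>
    rcases Nat.even_or_odd n with ⟨m, hm⟩ | ⟨m, hm⟩
    · -- n = 2m : (2m+1) &&& (2m) = 2m, so n = 0
      subst hm
      rw [show m + m = 2 * m from by omega, land_odd_even] at h
      simp at h
      subst h
      exact ⟨0, rfl⟩
    · -- n = 2m+1 : (2m+2) &&& (2m+1) = 2((m+1) &&& m)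
      subst hm
      rw [show 2 * m + 1 + 1 = 2 * (m + 1) from by omega, land_even_odd] at h
      obtain ⟨k, hk⟩ := ih m (by omega) (by omega)
      exact ⟨k + 1, by rw [pow_succ]; omega⟩

theorem land_pow_two_pred (k : Nat) : (2 ^ k) &&& (2 ^ k - 1) = 0 := by
  apply Nat.eq_of_testBit_eq
  intro i
  rw [Nat.testBit_land, Nat.testBit_two_pow, Nat.testBit_two_pow_sub_one]
  simp only [Nat.zero_testBit]
  by_cases h : k = i <;> simp [h]

-- the two element tests agree
theorem keep_eq (i : Int) :
    loopA i (i.toNat + 1) 2 = (decide (3 ≤ i) && (Int.land (i + 1) i == 0)) := by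
  have hloop := loopA_true_iff i (i.toNat + 1) 2 (fuel_sufficient i)
  rcases Int.lt_or_le i 3 with hlt | hge
  · have hA : loopA i (i.toNat + 1) 2 = false := by
      rw [Bool.eq_false_iff]
      intro htrue
      obtain ⟨k, hk, rfl⟩ := hloop.mp htrue
      have : (2:Int) ^ 2 ≤ 2 ^ k := pow_le_pow_right₀ (by norm_num) hk
      norm_num at this
      omega
    rw [hA, decide_eq_false (by omega), Bool.false_and]
  · -- i ≥ 3 : i = (n : Nat), compare with the power-of-two bit test
    obtain ⟨n, rfl⟩ : ∃ n : Nat, i = (n : Int) :=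
      ⟨i.toNat, (Int.toNat_of_nonneg (by omega)).symm⟩
    have hn : 3 ≤ n := by exact_mod_cast hge
    rw [decide_eq_true (by exact_mod_cast hge), Bool.true_and]
    have hland : Int.land ((n:Int) + 1) (n:Int) = ((((n + 1) &&& n : Nat)) : Int) := by
      rfl
    by_cases hb : (n + 1) &&& n = 0
    · -- B keeps it: n + 1 = 2^k, so A's loop finds it
      obtain ⟨k, hk⟩ := pow_two_of_land_succ n hb
      have hk2 : 2 ≤ k := by
        by_contra hc
        interval_cases k <;> norm_num at hk <;> omega
      have : loopA (n:Int) ((n:Int).toNat + 1) 2 = true := by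
        rw [hloop]
        refine ⟨k, hk2, ?_⟩
        have h' : (n:Int) + 1 = (2:Int) ^ k := by exact_mod_cast hk
        omega
      rw [this, hland]
      simp [hb]
    · -- B rejects it: n + 1 is no power of two, so no k with n = 2^k - 1
      have hA : loopA (n:Int) ((n:Int).toNat + 1) 2 = false := by
        rw [Bool.eq_false_iff]
        intro htrue
        obtain ⟨k, hk, hkeq⟩ := hloop.mp htrue
        apply hb
        have hpos : (1:Int) ≤ 2 ^ k := one_le_pow₀ (by norm_num)
        have hcast : (n : Int) + 1 = 2 ^ k := by omega
        have hn1 : n + 1 = 2 ^ k := by exact_mod_cast hcast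
        have hnk : 2 ^ k - 1 = n := by omega
        have hlz := land_pow_two_pred k
        rw [hnk] at hlz
        rw [hn1]
        exact hlz
      rw [hA, hland]
      simp [hb]

theorem foldl_append_filter (p : Int → Bool) (lst acc : List Int) :
    lst.foldl (fun output i => if p i then output ++ [i] else output) acc
      = acc ++ lst.filter p := by
  induction lst generalizing acc with
  | nil => simp
  | cons x xs ih =>
    simp only [List.foldl_cons, List.filter_cons]
    by_cases h : p x <;> simp [h, ih]

-- ===== VERDICT (by name: the statement is the Claim_ definition above) =====
theorem is_part_of_series_spec : Claim_equal_is_part_of_series := by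
  intro lst _
  unfold Spec_is_part_of_series is_part_of_series is_part_of_series_alt
  have hfun : (fun (output : List Int) (i : Int) =>
        if loopA i (i.toNat + 1) 2 then output ++ [i] else output)
      = (fun output i =>
        if (decide (3 ≤ i) && (Int.land (i + 1) i == 0)) then output ++ [i] else output) := by
    funext output i
    rw [keep_eq i]
  rw [hfun]
  simpa using foldl_append_filter (fun i => decide (3 ≤ i) && (Int.land (i + 1) i == 0)) lst []
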